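-- pv_equiv track=rewrite | github.com/pleinx/ark-save-parser | examples/asv_json_export/export_tamed.py | pad_colors
-- ===== SOURCE A (Python) =====
-- import ast
-- from typing import Any, Dict, List, Optional, Tuple
--
-- def pad_colors(color_indices: Any, length: int = 6) -> List[Optional[int]]:
--     """Parse color indices from list/str and pad to fixed length with None."""
--     if isinstance(color_indices, str):
--         try:
--             color_indices = ast.literal_eval(color_indices)
--         except (ValueError, SyntaxError):
--             color_indices = []
--     if not isinstance(color_indices, (list, tuple)):
--         color_indices = []
--     out: List[Optional[int]] = []
--     for v in list(color_indices)[:length]: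
--         try:
--             out.append(int(v))
--         except (TypeError, ValueError):
--             out.append(None)
--     out += [None] * max(0, length - len(out))
--     return out
-- ===== SOURCE B (Python) =====
-- from typing import Any, List, Optional
--
--
-- def pad_colors(color_indices: Any, length: int = 6) -> List[Optional[int]]:
--     """Pad-and-slice in one closed form.
--
--     Note: the verified domain is a list of ints; the string-literal parsing
--     branch of the original (ast.literal_eval) is outside it, so a string
--     argument is treated like any other non-list: normalized to [].
--     """
--     if not isinstance(color_indices, (list, tuple)):
--         color_indices = []
--
--     def conv(v):
--         try:
--             return int(v)
--         except (TypeError, ValueError):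
--             return None
--
--     return ([conv(v) for v in color_indices] + [None] * length)[:length]
-- ===== Notes on version B (the rewrite author's own statement) =====
-- stated objective: simpler
-- what changed: A's two sequential phases (a truncate-then-convert append loop, then a computed [None]*max(0,length-len(out)) padding step) are replaced by one closed-form expression: convert every element, append length Nones, and slice the concatenation to [:length].
import Mathlib
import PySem

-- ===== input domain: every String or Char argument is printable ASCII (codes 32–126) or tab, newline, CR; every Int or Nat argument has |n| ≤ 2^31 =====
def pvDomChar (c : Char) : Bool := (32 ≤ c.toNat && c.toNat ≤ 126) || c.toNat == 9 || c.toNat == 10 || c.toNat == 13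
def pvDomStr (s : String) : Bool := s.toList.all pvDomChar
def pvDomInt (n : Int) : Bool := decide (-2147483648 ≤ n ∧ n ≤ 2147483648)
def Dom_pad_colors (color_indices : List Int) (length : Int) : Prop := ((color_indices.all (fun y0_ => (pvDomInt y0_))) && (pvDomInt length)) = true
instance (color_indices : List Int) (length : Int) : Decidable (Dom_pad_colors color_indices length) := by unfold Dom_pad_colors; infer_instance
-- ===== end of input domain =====

-- B replaces A's truncate-then-convert loop plus computed None padding by one closed form:
-- convert every element, append length Nones, slice to length ("simpler", same cost).

-- ===== PORT A =====
-- On the typed domain (List Int) the isinstance normalization is the identity and int(v)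
-- always succeeds, so the try/except arm appending None is never taken.
def pad_colors (color_indices : List Int) (length : Int) : List (Option Int) :=
  -- for v in list(color_indices)[:length]: out.append(int(v))
  let out : List (Option Int) :=
    (PySem.List.slice color_indices none (some length)).foldl (fun acc v => acc ++ [some v]) []
  -- out += [None] * max(0, length - len(out))
  out ++ List.replicate (max 0 (length - PySem.List.len out)).toNat none

-- ===== PORT B =====
-- ([int(v) for v in color_indices] + [None] * length)[:length]
def pad_colors_alt (color_indices : List Int) (length : Int) : List (Option Int) :=
  PySem.List.slice (color_indices.map (fun v => some v) ++ List.replicate length.toNat none)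
    none (some length)

-- ===== PRECONDITION & SPEC =====
def Spec_pad_colors (color_indices : List Int) (length : Int) (out : List (Option Int)) : Prop := out = pad_colors_alt color_indices length
instance (color_indices : List Int) (length : Int) (out : List (Option Int)) : Decidable (Spec_pad_colors color_indices length out) := by unfold Spec_pad_colors; infer_instance

-- ===== CLAIM (what is proved, stated in full; the proofs are below) =====
def Claim_equal_pad_colors : Prop := ∀ (color_indices : List Int) (length : Int), Dom_pad_colors color_indices length → Spec_pad_colors color_indices length (pad_colors color_indices length)

-- ===== LEMMAS AND PROOFS =====

-- ===== VERDICT (by name: the statement is the Claim_ definition above) =====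
theorem pad_colors_spec : Claim_equal_pad_colors := by
  intro ci L _
  unfold Spec_pad_colors pad_colors pad_colors_alt
  rcases (by omega : 0 ≤ L ∨ L < 0) with hL | hL
  · -- length ≥ 0: both sides are (map some of the first L elements) ++ Nones up to L
    rw [PySem.List.slice_to _ hL, PySem.List.slice_to _ hL,
        PySem.List.foldl_append_singleton_eq_map, List.take_append]
    simp only [List.nil_append, PySem.List.len_eq, List.length_map, List.length_take,
      List.take_replicate, ← List.map_take]
    congr 1
    · congr 1
      omega
  · -- length < 0: no padding on either side; both slices drop the last |length| elements
    have h0 : L.toNat = 0 := by omega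
    have hk : 0 < (-L).toNat := by omega
    have hmax : ∀ c : Nat, (max 0 (L - (c : Int))).toNat = 0 := fun c => by omega
    rw [h0, show (some L) = some (-(((-L).toNat : Int))) from by congr 1; omega]
    rw [PySem.List.slice_to_neg_natCast (k := (-L).toNat) _ hk,
        PySem.List.slice_to_neg_natCast (k := (-L).toNat) _ hk,
        PySem.List.foldl_append_singleton_eq_map]
    simp only [List.nil_append, List.replicate_zero, List.append_nil, PySem.List.len_eq,
      List.length_map, List.length_take, ← List.map_take, hmax]
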